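-- pv_equiv track=rewrite | github.com/MyElephantLover/Python | Process_Deployment_Simulation.py | process_deployment
-- ===== SOURCE A (Python) =====
-- from typing import List
--
-- def process_deployment(times: List[int]) -> int:
--     # edge case
--     if not times:
--         return 0
--
--     count = 1 # at least one deployment batch
--     curr_max = times[0]
--
--     for t in times[1:]:
--         if t <= curr_max:
--             # joins current deployment batch
--             continue
--
--         else:
--             # new deployment batch
--             count += 1
--             curr_max = t
--
--     return count
-- ===== SOURCE B (Python) =====
-- from itertools import accumulate
-- from typing import List
--
-- def process_deployment(times: List[int]) -> int:
--     # Batches = number of DISTINCT values among the prefix maxima: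
--     # the running max changes value exactly when a new batch starts.
--     return len(set(accumulate(times, max)))
-- ===== Notes on version B (the rewrite author's own statement) =====
-- stated objective: idiomatic
-- what changed: Replaced A's stateful counting loop (counter plus current-max updated through branches) by a set-cardinality formulation: the answer is the number of distinct values among the prefix maxima, computed as len(set(accumulate(times, max))) with no counter and no branch logic.
import Mathlib
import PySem

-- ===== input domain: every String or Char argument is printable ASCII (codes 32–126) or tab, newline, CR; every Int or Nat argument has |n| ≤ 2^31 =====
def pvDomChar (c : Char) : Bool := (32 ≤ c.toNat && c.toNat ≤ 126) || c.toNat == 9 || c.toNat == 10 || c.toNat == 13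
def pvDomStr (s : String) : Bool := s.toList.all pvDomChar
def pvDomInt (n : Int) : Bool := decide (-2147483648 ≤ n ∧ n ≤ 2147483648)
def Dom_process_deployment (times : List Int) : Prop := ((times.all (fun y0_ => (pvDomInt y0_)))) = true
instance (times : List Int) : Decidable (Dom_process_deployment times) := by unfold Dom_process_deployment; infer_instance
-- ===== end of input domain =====

-- B replaces A's stateful counting loop by a set-cardinality formulation: the answer is the number of distinct values among the prefix maxima (alternative decomposition, same cost).


-- ===== PORT A =====
def process_deployment (times : List Int) : Int :=
  match times with
  | [] => 0
  | t0 :: rest =>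
    (rest.foldl
      (fun (s : Int × Int) t => if t ≤ s.2 then s else (s.1 + 1, t))
      (1, t0)).1

-- ===== PORT B =====
-- accumulate(times, max): the running-maximum sequence (helper for the tail)
def pvAccMax (acc : Int) : List Int → List Int
  | [] => []
  | t :: r => (max acc t) :: pvAccMax (max acc t) r

-- len(set(accumulate(times, max)))
def process_deployment_alt (times : List Int) : Int :=
  let pm : List Int :=
    match times with
    | [] => []
    | t0 :: rest => t0 :: pvAccMax t0 rest
  ((PySem.Set.ofList pm).length : Int)

-- ===== PRECONDITION & SPEC =====
def Spec_process_deployment (times : List Int) (out : Int) : Prop := out = process_deployment_alt times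
instance (times : List Int) (out : Int) : Decidable (Spec_process_deployment times out) := by unfold Spec_process_deployment; infer_instance

-- ===== CLAIM (what is proved, stated in full; the proofs are below) =====
def Claim_equal_process_deployment : Prop := ∀ (times : List Int), Dom_process_deployment times → Spec_process_deployment times (process_deployment times)

-- ===== LEMMAS AND PROOFS =====

-- abstract count of strict increases along the running-max chain
def pvCnt (cm : Int) : List Int → Int
  | [] => 0
  | t :: r => if t ≤ cm then pvCnt cm r else 1 + pvCnt t r

theorem pvA_foldl (rest : List Int) : ∀ (c cm : Int),
    (rest.foldl (fun (s : Int × Int) t => if t ≤ s.2 then s else (s.1 + 1, t)) (c, cm)).1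
      = c + pvCnt cm rest := by
  induction rest with
  | nil => intro c cm; simp [pvCnt]
  | cons t r ih =>
    intro c cm
    by_cases h : t ≤ cm
    · simp [List.foldl, pvCnt, h, ih]
    · simp only [List.foldl, pvCnt, if_neg h]
      rw [ih]
      ring

-- every element of the running-max chain is ≥ the seed
theorem pvAccMax_ge (r : List Int) : ∀ (cm x : Int), x ∈ pvAccMax cm r → cm ≤ x := by
  induction r with
  | nil => intro cm x hx; simp [pvAccMax] at hx
  | cons t r ih =>
    intro cm x hx
    simp only [pvAccMax, List.mem_cons] at hx
    rcases hx with h | h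
    · omega
    · have := ih (max cm t) x h; omega

-- folding Set.add over a list not containing x keeps x at the head
theorem pv_cons_foldl_add (L : List Int) : ∀ (s : List Int) (x : Int), x ∉ L →
    L.foldl PySem.Set.add (x :: s) = x :: L.foldl PySem.Set.add s := by
  induction L with
  | nil => intro s x _; rfl
  | cons y L ih =>
    intro s x hx
    have hyx : y ≠ x := fun h => hx (by simp [h])
    have hstep : PySem.Set.add (x :: s) y = x :: PySem.Set.add s y := by
      by_cases hm : y ∈ s
      · rw [PySem.Set.add_of_mem hm, PySem.Set.add_of_mem (by simp [hm])]
      · rw [PySem.Set.add_of_not_mem hm,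
            PySem.Set.add_of_not_mem (by simp [hm, hyx])]
        rfl
    simp only [List.foldl, hstep]
    exact ih (PySem.Set.add s y) x (fun h => hx (by simp [h]))

-- distinct values of the running-max chain, counted against pvCnt
theorem pvB_count (rest : List Int) : ∀ (cm : Int),
    ((PySem.Set.ofList (cm :: pvAccMax cm rest)).length : Int) = 1 + pvCnt cm rest := by
  induction rest with
  | nil => intro cm; simp [pvAccMax, pvCnt, PySem.Set.ofList]
  | cons t r ih =>
    intro cm
    by_cases h : t ≤ cm
    · have hm : max cm t = cm := max_eq_left h
      show (((cm :: max cm t :: pvAccMax (max cm t) r).foldl PySem.Set.add []).length : Int) = _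
      rw [hm]
      have h1 : (cm :: cm :: pvAccMax cm r).foldl PySem.Set.add []
          = (cm :: pvAccMax cm r).foldl PySem.Set.add [] := by
        simp only [List.foldl]
        rw [PySem.Set.add_of_mem (s := PySem.Set.add [] cm) (by
          rw [PySem.Set.add_of_not_mem (by simp)]; simp)]
      rw [h1]
      have := ih cm
      simp only [PySem.Set.ofList_eq_foldl] at this
      rw [this]
      simp [pvCnt, h]
    · have hm : max cm t = t := max_eq_right (by omega)
      show (((cm :: max cm t :: pvAccMax (max cm t) r).foldl PySem.Set.add []).length : Int) = _
      rw [hm]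
      have hcm_notin : cm ∉ (t :: pvAccMax t r) := by
        intro hmem
        rcases List.mem_cons.mp hmem with h1 | h1
        · omega
        · have := pvAccMax_ge r t cm h1; omega
      have h2 : (cm :: t :: pvAccMax t r).foldl PySem.Set.add []
          = cm :: (t :: pvAccMax t r).foldl PySem.Set.add [] := by
        simp only [List.foldl]
        rw [PySem.Set.add_of_not_mem (x := cm) (by simp)]
        show (t :: pvAccMax t r).foldl PySem.Set.add ([cm]) = _
        have : ([cm] : List Int) = cm :: ([] : List Int) := rfl
        rw [this, pv_cons_foldl_add _ _ _ hcm_notin]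
        rfl
      rw [h2]
      have := ih t
      simp only [PySem.Set.ofList_eq_foldl] at this
      simp only [List.length_cons]
      push_cast
      rw [this]
      simp only [pvCnt, if_neg h]
      ring

-- ===== VERDICT (by name: the statement is the Claim_ definition above) =====
theorem process_deployment_spec : Claim_equal_process_deployment := by
  intro times _
  unfold Spec_process_deployment process_deployment process_deployment_alt
  cases times with
  | nil => rfl
  | cons t0 rest =>
    show (rest.foldl (fun (s : Int × Int) t => if t ≤ s.2 then s else (s.1 + 1, t)) (1, t0)).1
        = ((PySem.Set.ofList (t0 :: pvAccMax t0 rest)).length : Int)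
    rw [pvA_foldl, pvB_count]
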